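-- pv_equiv track=rewrite | github.com/ABHI99RAJPUT/NIRIKSHA.ai | src/main.py | _split_ids
-- ===== SOURCE A (Python) =====
-- from typing import List, Optional, Dict, Any, Union, Set, Tuple
--
-- def _split_ids(ids: List[str]) -> Dict[str, List[str]]:
--     case_ids, policy_nums, order_nums = set(), set(), set()
--     for s in ids:
--         u = s.upper()
--         if u.startswith(("REF", "REFERENCE", "TICKET", "CASE", "COMPLAINT")):
--             case_ids.add(u)
--         if u.startswith("POLICY"):
--             policy_nums.add(u)
--         if u.startswith(("ORDER", "ORD", "AWB", "APP", "BILL", "KYC", "TXN", "TRANSACTION")):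
--             order_nums.add(u)
--     return {
--         "caseIds": sorted(case_ids),
--         "policyNumbers": sorted(policy_nums),
--         "orderNumbers": sorted(order_nums),
--     }
-- ===== SOURCE B (Python) =====
-- def _split_ids(ids):
--     items = sorted({s.upper() for s in ids})
--     return {
--         "caseIds": [u for u in items if u.startswith(("REF", "REFERENCE", "TICKET", "CASE", "COMPLAINT"))],
--         "policyNumbers": [u for u in items if u.startswith("POLICY")],
--         "orderNumbers": [u for u in items if u.startswith(("ORDER", "ORD", "AWB", "APP", "BILL", "KYC", "TXN", "TRANSACTION"))],
--     }
-- ===== Notes on version B (the rewrite author's own statement) =====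
-- stated objective: simpler
-- what changed: B deduplicates and sorts the uppercased ids once up front, then produces each category as a filter of that single sorted list, instead of maintaining three sets during a loop and sorting each of them separately.
import Mathlib
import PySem

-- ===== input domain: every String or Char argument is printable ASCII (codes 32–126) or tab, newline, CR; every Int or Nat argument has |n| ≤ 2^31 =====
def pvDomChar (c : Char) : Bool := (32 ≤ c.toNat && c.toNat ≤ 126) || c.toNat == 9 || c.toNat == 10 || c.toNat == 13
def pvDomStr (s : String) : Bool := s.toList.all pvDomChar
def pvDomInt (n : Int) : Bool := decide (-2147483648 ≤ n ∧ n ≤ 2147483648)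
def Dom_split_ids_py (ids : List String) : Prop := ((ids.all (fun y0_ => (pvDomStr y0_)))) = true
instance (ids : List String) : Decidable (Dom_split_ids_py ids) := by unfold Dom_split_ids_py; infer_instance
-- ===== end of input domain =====

-- B replaces A's three loop-maintained sets (each sorted at the end) by one dedup+sort of the
-- uppercased ids followed by three filters; return values only, neither mutates its argument.

-- ===== PORT A =====
-- u.startswith((p1, …, pn)) — Python's tuple form is true iff some prefix matches
def pvCasePref (u : String) : Bool :=
  (["REF", "REFERENCE", "TICKET", "CASE", "COMPLAINT"] : List String).any
    (fun p => PySem.Str.startswith u p)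
def pvOrderPref (u : String) : Bool :=
  (["ORDER", "ORD", "AWB", "APP", "BILL", "KYC", "TXN", "TRANSACTION"] : List String).any
    (fun p => PySem.Str.startswith u p)

def split_ids_py (ids : List String) : List (String × List String) :=
  let st : PySem.Set String × PySem.Set String × PySem.Set String :=
    ids.foldl (fun acc s =>
      let u := PySem.Str.upper s
      let acc := if pvCasePref u then (PySem.Set.add acc.1 u, acc.2.1, acc.2.2) else acc
      let acc := if PySem.Str.startswith u "POLICY" then (acc.1, PySem.Set.add acc.2.1 u, acc.2.2) else acc
      if pvOrderPref u then (acc.1, acc.2.1, PySem.Set.add acc.2.2 u) else acc)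
      (PySem.Set.empty, PySem.Set.empty, PySem.Set.empty)
  [("caseIds", PySem.List.sorted st.1 (fun x => x) false),
   ("policyNumbers", PySem.List.sorted st.2.1 (fun x => x) false),
   ("orderNumbers", PySem.List.sorted st.2.2 (fun x => x) false)]

-- ===== PORT B =====
def split_ids_py_alt (ids : List String) : List (String × List String) :=
  let items := PySem.List.sorted (PySem.Set.ofList (ids.map PySem.Str.upper)) (fun x => x) false
  [("caseIds", items.filter (fun u => pvCasePref u)),
   ("policyNumbers", items.filter (fun u => PySem.Str.startswith u "POLICY")),
   ("orderNumbers", items.filter (fun u => pvOrderPref u))]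

-- ===== PRECONDITION & SPEC =====
def Spec_split_ids_py (ids : List String) (out : List (String × List String)) : Prop := out = split_ids_py_alt ids
instance (ids : List String) (out : List (String × List String)) : Decidable (Spec_split_ids_py ids out) := by unfold Spec_split_ids_py; infer_instance

-- ===== CLAIM (what is proved, stated in full; the proofs are below) =====
def Claim_equal_split_ids_py : Prop := ∀ (ids : List String), Dom_split_ids_py ids → Spec_split_ids_py ids (split_ids_py ids)

-- ===== LEMMAS AND PROOFS =====

-- the single-set fold that each projection of A's triple fold performs
def pvCondAdd (p : String → Bool) (ids : List String) (a : PySem.Set String) : PySem.Set String :=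
  ids.foldl (fun s x => if p (PySem.Str.upper x) then PySem.Set.add s (PySem.Str.upper x) else s) a

theorem pvFold_proj (ids : List String)
    (acc : PySem.Set String × PySem.Set String × PySem.Set String) :
    (ids.foldl (fun acc s =>
      let u := PySem.Str.upper s
      let acc := if pvCasePref u then (PySem.Set.add acc.1 u, acc.2.1, acc.2.2) else acc
      let acc := if PySem.Str.startswith u "POLICY" then (acc.1, PySem.Set.add acc.2.1 u, acc.2.2) else acc
      if pvOrderPref u then (acc.1, acc.2.1, PySem.Set.add acc.2.2 u) else acc) acc)
    = (pvCondAdd pvCasePref ids acc.1,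
       pvCondAdd (fun u => PySem.Str.startswith u "POLICY") ids acc.2.1,
       pvCondAdd pvOrderPref ids acc.2.2) := by
  induction ids generalizing acc with
  | nil => simp [pvCondAdd]
  | cons x xs ih =>
    simp only [List.foldl_cons, pvCondAdd]
    rw [show (List.foldl _ _ _ : _ × _ × _) = _ from ih _]
    simp only [pvCondAdd]
    split_ifs <;> rfl

theorem pvCondAdd_eq_update (p : String → Bool) (ids : List String) (a : PySem.Set String) :
    pvCondAdd p ids a = PySem.Set.update a ((ids.map PySem.Str.upper).filter p) := by
  induction ids generalizing a with
  | nil => simp [pvCondAdd, PySem.Set.update]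
  | cons x xs ih =>
    simp only [pvCondAdd, List.foldl_cons, List.map_cons, List.filter_cons] at *
    by_cases h : p (PySem.Str.upper x) <;>
      simp [h, ih, PySem.Set.update]

theorem pvCondAdd_eq_ofList (p : String → Bool) (ids : List String) :
    pvCondAdd p ids PySem.Set.empty = PySem.Set.ofList ((ids.map PySem.Str.upper).filter p) := by
  rw [pvCondAdd_eq_update]
  exact PySem.Set.update_nil_left _

-- sorting the set of the p-matching elements = filtering p out of the sorted set of all elements
theorem pvSorted_filter (p : String → Bool) (l : List String) :
    PySem.List.sorted (PySem.Set.ofList (l.filter p)) (fun x => x) false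
      = (PySem.List.sorted (PySem.Set.ofList l) (fun x => x) false).filter p := by
  apply PySem.List.sorted_eq_of_perm_of_pairwise_lt
  · -- permutation: both are nodup with the same members
    have h1 : ((PySem.List.sorted (PySem.Set.ofList l) (fun x => x) false).filter p).Nodup := by
      apply List.Nodup.filter
      exact (PySem.List.sorted_ofList_pairwise_lt (xs := l)).nodup
    have h2 : (PySem.Set.ofList (l.filter p) : List String).Nodup := PySem.Set.nodup_ofList _
    rw [List.perm_ext_iff_of_nodup h1 h2]
    intro a
    simp [List.mem_filter, PySem.List.mem_sorted, PySem.Set.mem_ofList, and_comm]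
  · exact (PySem.List.sorted_ofList_pairwise_lt (xs := l)).filter _

-- ===== VERDICT (by name: the statement is the Claim_ definition above) =====
theorem split_ids_py_spec : Claim_equal_split_ids_py := by
  intro ids _
  show split_ids_py ids = split_ids_py_alt ids
  unfold split_ids_py split_ids_py_alt
  rw [pvFold_proj]
  simp only [pvCondAdd_eq_ofList, pvSorted_filter]
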